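-- pv_equiv track=rewrite | github.com/tada3/hackerrank | Square-Ten_Tree/python/solution.py | minusMBIOld
-- ===== SOURCE A (Python) =====
-- def minus1D(c):
-- 	if c == '0':
-- 		return '9', True
-- 	u = ord(c) - 1
-- 	return chr(u), False
--
-- def minusMBIOld(x, y): # x - y (x > y)
-- 	z = []
-- 	carry = False
-- 	for i in range(len(x)-1, -1, -1):
-- 		tmp = x[i]
-- 		if carry:
-- 			tmp, carry = minus1D(tmp)
-- 		tmp, carry1 = minusD(tmp, y[i])
-- 		carry = carry or carry1
-- 		z.append(tmp)
-- 	return list(reversed(z)), carry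
--
-- def minusD(x, y):
-- 	if x == y:
-- 		return '0', False
-- 	if x > y:
-- 		z = ord(x) - ord(y) + ord('0')
-- 		return chr(z), False
-- 	# x < y
-- 	z = 10 + ord(x) - ord(y) + ord('0')
-- 	return chr(z), True
-- ===== SOURCE B (Python) =====
-- def minusMBIOld(x, y):  # x - y (x > y); whole-number subtraction instead of per-digit borrow propagation
--     n = len(x)
--     X = 0
--     for s in x:
--         X = 10 * X + (ord(s) - 48)
--     Y = 0
--     for s in y[:n]:
--         Y = 10 * Y + (ord(s) - 48)
--     d = X - Y
--     m = d % 10 ** n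
--     z = []
--     for _ in range(n):
--         z.append(chr(48 + m % 10))
--         m //= 10
--     return z[::-1], d < 0
-- ===== Notes on version B (the rewrite author's own statement) =====
-- stated objective: alternative
-- what changed: replaces A's right-to-left per-digit borrow-propagation loop (character compare/ord/chr per position) with one whole-number subtraction: both digit lists are folded into integers, subtracted once, and the ten's-complement digits are read off d % 10**n, with the borrow flag taken from d < 0
-- outside the precondition, e.g. on minusMBIOld(['A'], ['0']): A returns (['A'], False), B returns (['7'], False)
import Mathlib
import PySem

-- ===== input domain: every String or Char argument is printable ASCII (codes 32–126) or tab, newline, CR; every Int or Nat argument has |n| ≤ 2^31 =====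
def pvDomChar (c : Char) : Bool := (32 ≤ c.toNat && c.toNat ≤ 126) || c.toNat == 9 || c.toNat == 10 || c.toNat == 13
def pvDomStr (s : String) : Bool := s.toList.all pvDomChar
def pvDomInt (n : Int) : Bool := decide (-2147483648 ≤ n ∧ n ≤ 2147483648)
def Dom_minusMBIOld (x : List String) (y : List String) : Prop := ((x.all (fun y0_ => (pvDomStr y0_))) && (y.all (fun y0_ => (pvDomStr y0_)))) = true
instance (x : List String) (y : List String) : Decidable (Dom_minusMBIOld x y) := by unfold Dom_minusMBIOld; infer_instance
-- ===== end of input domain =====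

-- B replaces A's right-to-left per-digit borrow-propagation loop by one whole-number subtraction
-- (fold the digit lists into integers, subtract once, read the result digits off d % 10**n); objective: alternative.

-- ord(s): exact when s is a single character (the only case reached under Pre_)
def pyOrdS (s : String) : Int := ((s.toList.headD ' ').toNat : Int)
-- chr(u): exact for 0 ≤ u < 0x110000 (the only case reached under Pre_)
def pyChrS (u : Int) : String := String.ofList [Char.ofNat u.toNat]

-- ===== PORT A =====
def minus1D (c : String) : String × Bool :=
  if c = "0" then ("9", true)
  else
    let u := pyOrdS c - 1
    (pyChrS u, false)

def minusD (x : String) (y : String) : String × Bool :=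
  if x = y then ("0", false)
  else if y < x then
    let z := pyOrdS x - pyOrdS y + pyOrdS "0"
    (pyChrS z, false)
  else
    let z := 10 + pyOrdS x - pyOrdS y + pyOrdS "0"
    (pyChrS z, true)

def minusMBIOld (x : List String) (y : List String) : List String × Bool :=
  let st := (PySem.List.pyRange (PySem.List.len x - 1) (-1) (-1)).foldl
    (fun (st : List String × Bool) i =>
      let tmp0 := PySem.List.pyGetD x i ""              -- x[i]; in range on every input Pre_ admits
      let p1 := if st.2 then minus1D tmp0 else (tmp0, st.2)
      let p2 := minusD p1.1 (PySem.List.pyGetD y i "")  -- y[i]; in range on every input Pre_ admits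
      (st.1 ++ [p2.1], p1.2 || p2.2))
    ([], false)
  (st.1.reverse, st.2)

-- ===== PORT B =====
def minusMBIOld_alt (x : List String) (y : List String) : List String × Bool :=
  let n := x.length
  let X := x.foldl (fun a s => 10 * a + (pyOrdS s - 48)) (0 : Int)
  let Y := (PySem.List.slice y none (some (n : Int))).foldl (fun a s => 10 * a + (pyOrdS s - 48)) (0 : Int)
  let d := X - Y
  let st := (PySem.List.pyRange 0 (n : Int) 1).foldl
    (fun (st : List String × Int) _ =>
      (st.1 ++ [pyChrS (48 + PySem.Int.mod st.2 10)], PySem.Int.floordiv st.2 10))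
    ([], PySem.Int.mod d (10 ^ n))
  ((PySem.List.slice? st.1 none none (-1)).getD [], decide (d < 0))

-- ===== PRECONDITION & SPEC =====
def pvDigitStrs : List String := ["0","1","2","3","4","5","6","7","8","9"]

-- Pre_ restricts to the function's natural domain: every element of x and of y[:len(x)] is a single
-- decimal-digit character and len(x) ≤ len(y).  Outside it A either raises (multi-character or empty
-- elements feed ord(), an x longer than y indexes past y) or applies its character arithmetic to
-- non-digit characters, producing meaningless non-digit output that B does not reproduce.
def Pre_minusMBIOld (x : List String) (y : List String) : Prop :=
  (x.all (fun s => s ∈ pvDigitStrs) && (y.take x.length).all (fun s => s ∈ pvDigitStrs)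
    && decide (x.length ≤ y.length)) = true
instance (x : List String) (y : List String) : Decidable (Pre_minusMBIOld x y) := by unfold Pre_minusMBIOld; infer_instance

def pvWitness_minusMBIOld : List String × List String := (["7","2"], ["6","9"])

def Spec_minusMBIOld (x : List String) (y : List String) (out : List String × Bool) : Prop := out = minusMBIOld_alt x y
instance (x : List String) (y : List String) (out : List String × Bool) : Decidable (Spec_minusMBIOld x y out) := by unfold Spec_minusMBIOld; infer_instance

-- ===== CLAIM (what is proved, stated in full; the proofs are below) =====
def Claim_equal_minusMBIOld : Prop := ∀ (x : List String) (y : List String), Dom_minusMBIOld x y → Pre_minusMBIOld x y → Spec_minusMBIOld x y (minusMBIOld x y)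

-- ===== LEMMAS AND PROOFS =====

def pvDigitChars : List Char := ['0','1','2','3','4','5','6','7','8','9']

-- digit value of a digit character
def dval (c : Char) : ℕ := c.toNat - 48

-- first character of a (single-character) string
def toC (s : String) : Char := s.toList.headD ' '

-- little-endian value of a digit list
def valLE : List ℕ → ℕ
  | [] => 0
  | d :: ds => d + 10 * valLE ds

-- the n low little-endian decimal digits of an integer
def digLE : ℕ → ℤ → List ℕ
  | 0, _ => []
  | n + 1, m => (m % 10).toNat :: digLE n (m / 10)

-- structural form of A's loop body over (x[i], y[i]) pairs, little-endian
def goA : List (String × String) → Bool → List String × Bool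
  | [], c => ([], c)
  | p :: ps, c =>
    let p1 := if c then minus1D p.1 else (p.1, c)
    let p2 := minusD p1.1 p.2
    let r := goA ps (p1.2 || p2.2)
    (p2.1 :: r.1, r.2)

-- the same recursion on numeric digit values
def goN : List (ℕ × ℕ) → Bool → List ℕ × Bool
  | [], c => ([], c)
  | p :: ps, c =>
    let z := (10 + p.1 - p.2 - c.toNat) % 10
    let r := goN ps (decide (p.1 < p.2 + c.toNat))
    (z :: r.1, r.2)

lemma valLE_append_singleton (l : List ℕ) (d : ℕ) :
    valLE (l ++ [d]) = valLE l + d * 10 ^ l.length := by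
  induction l with
  | nil => simp [valLE]
  | cons a l ih => simp [valLE, ih, pow_succ]; ring

lemma digLE_succ_right (n : ℕ) : ∀ m : ℤ,
    digLE (n + 1) m = digLE n m ++ [((m / 10 ^ n) % 10).toNat] := by
  induction n with
  | zero => intro m; simp [digLE]
  | succ n ih =>
    intro m
    have h1 : m / 10 / 10 ^ n = m / 10 ^ (n + 1) := by
      rw [Int.ediv_ediv_eq_ediv_mul (by norm_num)]
      norm_num [pow_succ, mul_comm]
    calc digLE (n + 1 + 1) m = (m % 10).toNat :: digLE (n + 1) (m / 10) := rfl
      _ = (m % 10).toNat :: (digLE n (m / 10) ++ [((m / 10 / 10 ^ n) % 10).toNat]) := by rw [ih]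
      _ = digLE (n + 1) m ++ [((m / 10 ^ (n + 1)) % 10).toNat] := by rw [h1]; rfl

-- key modular step: splitting off the low digit under the big modulus
lemma emod_pow_succ_split (z K : ℤ) (n : ℕ) (h0 : 0 ≤ z) (h1 : z < 10) :
    (z + 10 * K) % 10 ^ (n + 1) = z + 10 * (K % 10 ^ n) := by
  have hpow : (0:ℤ) < 10 ^ n := by positivity
  have hK : K % 10 ^ n = K - 10 ^ n * (K / 10 ^ n) := Int.emod_def K (10 ^ n)
  have hrepr : z + 10 * K = (z + 10 * (K % 10 ^ n)) + 10 ^ (n + 1) * (K / 10 ^ n) := by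
    rw [hK]; ring
  rw [hrepr, Int.add_mul_emod_self_left]
  have hKm0 : 0 ≤ K % 10 ^ n := Int.emod_nonneg K (by positivity)
  have hKm1 : K % 10 ^ n < 10 ^ n := Int.emod_lt_of_pos K hpow
  exact Int.emod_eq_of_lt (by omega) (by rw [pow_succ]; omega)

-- goN computes the n low decimal digits of X - Y - c and the final borrow
lemma goN_eq : ∀ (ps : List (ℕ × ℕ)) (c : Bool),
    (∀ p ∈ ps, p.1 ≤ 9 ∧ p.2 ≤ 9) →
    goN ps c = (digLE ps.length
        (((valLE (ps.map Prod.fst) : ℤ) - valLE (ps.map Prod.snd) - c.toNat) % 10 ^ ps.length),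
      decide (valLE (ps.map Prod.fst) < valLE (ps.map Prod.snd) + c.toNat)) := by
  intro ps
  induction ps with
  | nil => intro c _; cases c <;> simp [goN, valLE, digLE]
  | cons p ps ih =>
    rintro c hd
    obtain ⟨a, b⟩ := p
    have ha : a ≤ 9 := (hd (a, b) (by simp)).1
    have hb : b ≤ 9 := (hd (a, b) (by simp)).2
    have hcn : c.toNat ≤ 1 := by cases c <;> simp
    rw [goN, ih _ (fun q hq => hd q (List.mem_cons_of_mem _ hq))]
    simp only [List.map_cons, List.length_cons, valLE]
    set A' := valLE (List.map Prod.fst ps) with hA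
    set B' := valLE (List.map Prod.snd ps) with hB
    set z := (10 + a - b - c.toNat) % 10 with hz
    set cb := decide (a < b + c.toNat) with hcb
    have hz1 : z < 10 := Nat.mod_lt _ (by norm_num)
    simp only [← hA, ← hB]
    have hW : ((a + 10 * A' : ℕ) : ℤ) - ((b + 10 * B' : ℕ) : ℤ) - (c.toNat : ℕ)
        = (z : ℤ) + 10 * ((A' : ℤ) - (B' : ℤ) - (cb.toNat : ℕ)) := by
      rcases hab : decide (a < b + c.toNat) with _ | _ <;>
        simp only [hcb, hab, Bool.toNat_false, Bool.toNat_true] <;>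
        · simp only [hz]
          simp only [decide_eq_false_iff_not, decide_eq_true_eq] at hab
          omega
    rw [Prod.mk.injEq]
    refine ⟨?_, ?_⟩
    · -- digit lists
      push_cast
      push_cast at hW
      rw [hW, emod_pow_succ_split _ _ _ (by positivity) (by exact_mod_cast hz1)]
      rw [digLE]
      congr 1
      · rw [Int.add_mul_emod_self_left, Int.emod_eq_of_lt (by positivity) (by exact_mod_cast hz1)]
        simp
      · rw [Int.add_mul_ediv_left _ _ (by norm_num : (10:ℤ) ≠ 0),
          Int.ediv_eq_zero_of_lt (by positivity) (by exact_mod_cast hz1), zero_add]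
    · -- borrow
      rw [decide_eq_decide]
      rcases hab : decide (a < b + c.toNat) with _ | _ <;>
        · simp only [hcb, hab, Bool.toNat_false, Bool.toNat_true]
          simp only [decide_eq_false_iff_not, decide_eq_true_eq] at hab
          omega

-- per-step evaluation of A's character arithmetic on digit characters
lemma stepA_eval (a b : Char) (c : Bool) (ha : a ∈ pvDigitChars) (hb : b ∈ pvDigitChars) :
    (minusD (if c then minus1D (String.ofList [a]) else (String.ofList [a], c)).1 (String.ofList [b])).1
        = String.ofList [Char.ofNat (48 + (10 + dval a - dval b - c.toNat) % 10)]
    ∧ ((if c then minus1D (String.ofList [a]) else (String.ofList [a], c)).2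
        || (minusD (if c then minus1D (String.ofList [a]) else (String.ofList [a], c)).1 (String.ofList [b])).2)
        = decide (dval a < dval b + c.toNat) := by
  fin_cases ha <;> fin_cases hb <;>
    (revert c; simp only [minus1D, minusD, String.lt_iff_toList_lt]; decide)

lemma goA_eq_goN : ∀ (ps : List (Char × Char)) (c : Bool),
    (∀ p ∈ ps, p.1 ∈ pvDigitChars ∧ p.2 ∈ pvDigitChars) →
    goA (ps.map (fun p => (String.ofList [p.1], String.ofList [p.2]))) c
      = ((goN (ps.map (fun p => (dval p.1, dval p.2))) c).1.map (fun d => String.ofList [Char.ofNat (48 + d)]),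
         (goN (ps.map (fun p => (dval p.1, dval p.2))) c).2) := by
  intro ps
  induction ps with
  | nil => intro c _; simp [goA, goN]
  | cons p ps ih =>
    intro c hd
    obtain ⟨a, b⟩ := p
    obtain ⟨hstep1, hstep2⟩ := stepA_eval a b c (hd (a, b) (by simp)).1 (hd (a, b) (by simp)).2
    simp only [List.map_cons, goA, goN, hstep1, hstep2,
      ih _ (fun q hq => hd q (List.mem_cons_of_mem _ hq))]

lemma foldA_go (ps : List (String × String)) :
    ∀ (z : List String) (c : Bool),
    ps.foldl (fun (st : List String × Bool) p =>
        (st.1 ++ [(minusD (if st.2 then minus1D p.1 else (p.1, st.2)).1 p.2).1],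
         (if st.2 then minus1D p.1 else (p.1, st.2)).2
           || (minusD (if st.2 then minus1D p.1 else (p.1, st.2)).1 p.2).2)) (z, c)
      = (z ++ (goA ps c).1, (goA ps c).2) := by
  induction ps with
  | nil => intro z c; simp [goA]
  | cons p ps ih => intro z c; simp [goA, ih]

lemma pairs_map (x y : List String) (hn : x.length ≤ y.length) :
    (PySem.List.pyRange ((x.length : ℤ) - 1) (-1) (-1)).map
        (fun i => (PySem.List.pyGetD x i "", PySem.List.pyGetD y i ""))
      = x.reverse.zip ((y.take x.length).reverse) := by
  have hlr : ((x.length : ℤ) - 1 - -1).toNat = x.length := by omega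
  have hty : (y.take x.length).length = x.length := by simp [hn]
  apply List.ext_getElem
  · simp [PySem.List.pyRange_neg_one, hlr, hty]
  · intro k h1 h2
    have hk : k < x.length := by
      simpa [PySem.List.pyRange_neg_one, hlr] using h1
    simp only [PySem.List.pyRange_neg_one, List.getElem_map, List.getElem_range]
    have hi0 : (0:ℤ) ≤ (x.length : ℤ) - 1 - k := by omega
    rw [PySem.List.pyGetD_eq_getElem x "" hi0 (by omega),
        PySem.List.pyGetD_eq_getElem y "" hi0 (by push_cast; omega),
        List.getElem_zip, List.getElem_reverse, List.getElem_reverse]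
    rw [List.getElem_take]
    have htn : ((x.length : ℤ) - 1 - k).toNat = x.length - 1 - k := by omega
    simp only [htn, hty]

lemma extract_loop (n : ℕ) : ∀ (m : ℤ) (z0 : List String),
    (PySem.List.pyRange 0 (n : ℤ) 1).foldl
        (fun (st : List String × Int) _ =>
          (st.1 ++ [pyChrS (48 + PySem.Int.mod st.2 10)], PySem.Int.floordiv st.2 10)) (z0, m)
      = (z0 ++ (digLE n m).map (fun d : ℕ => pyChrS (48 + (d : ℤ))), m / 10 ^ n) := by
  induction n with
  | zero =>
    intro m z0
    simp [PySem.List.pyRange_one_eq_nil, digLE]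
  | succ n ih =>
    intro m z0
    have hcast : ((n + 1 : ℕ) : ℤ) = (n : ℤ) + 1 := by push_cast; ring
    rw [hcast, PySem.List.pyRange_one_succ_right (by positivity), List.foldl_append, ih]
    simp only [List.foldl_cons, List.foldl_nil]
    have hmod : PySem.Int.mod (m / 10 ^ n) 10 = (m / 10 ^ n) % 10 := by
      simp [PySem.Int.mod, Int.fmod_eq_emod]
    have hdiv : PySem.Int.floordiv (m / 10 ^ n) 10 = m / 10 ^ (n + 1) := by
      simp [PySem.Int.floordiv, Int.fdiv_eq_ediv,
        Int.ediv_ediv_eq_ediv_mul (by positivity : (0:ℤ) ≤ 10 ^ n), pow_succ]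
    rw [hmod, hdiv, digLE_succ_right]
    have hnn : (0:ℤ) ≤ (m / 10 ^ n) % 10 := Int.emod_nonneg _ (by norm_num)
    simp [Int.toNat_of_nonneg hnn]

lemma horner_fold (cs : List Char) : ∀ (a0 : ℤ),
    (∀ c ∈ cs, c ∈ pvDigitChars) →
    (cs.map (fun c => String.ofList [c])).foldl (fun a s => 10 * a + (pyOrdS s - 48)) a0
      = a0 * 10 ^ cs.length + (valLE (cs.reverse.map dval) : ℤ) := by
  induction cs with
  | nil => intro a0 _; simp [valLE]
  | cons c cs ih =>
    intro a0 hd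
    have hc : (pyOrdS (String.ofList [c]) - 48) = (dval c : ℤ) := by
      have hmem := hd c (by simp)
      fin_cases hmem <;> decide
    simp only [List.map_cons, List.foldl_cons, hc, List.reverse_cons, List.map_append,
      ih (10 * a0 + (dval c : ℤ)) (fun c hc => hd c (by simp [hc]))]
    rw [show List.map dval cs.reverse ++ dval c :: List.map dval ([] : List Char)
        = List.map dval cs.reverse ++ [dval c] from rfl, valLE_append_singleton]
    push_cast
    simp only [List.length_cons, List.length_map, List.length_reverse, pow_succ]
    ring

lemma digit_strs_chars : ∀ s ∈ pvDigitStrs, String.ofList [toC s] = s ∧ toC s ∈ pvDigitChars := by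
  decide

lemma map_single_of_mem (l : List String) (h : ∀ s ∈ l, s ∈ pvDigitStrs) :
    l = (l.map toC).map (fun c => String.ofList [c]) ∧ ∀ c ∈ l.map toC, c ∈ pvDigitChars := by
  constructor
  · rw [List.map_map]
    conv_lhs => rw [← List.map_id l]
    apply List.map_congr_left
    intro s hs
    exact ((digit_strs_chars s (h s hs)).1).symm
  · intro c hc
    obtain ⟨s, hs, rfl⟩ := List.mem_map.mp hc
    exact (digit_strs_chars s (h s hs)).2

-- ===== VERDICT (by name: the statement is the Claim_ definition above) =====
set_option maxRecDepth 8000 in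
theorem minusMBIOld_spec : Claim_equal_minusMBIOld := by
  intro x y _ hpre
  unfold Pre_minusMBIOld at hpre
  simp only [Bool.and_eq_true, List.all_eq_true, decide_eq_true_eq] at hpre
  obtain ⟨⟨hx, hy⟩, hlen⟩ := hpre
  unfold Spec_minusMBIOld
  obtain ⟨hxeq, hxc⟩ := map_single_of_mem x (fun s hs => by simpa using hx s hs)
  obtain ⟨hyeq, hyc⟩ := map_single_of_mem (y.take x.length) (fun s hs => by simpa using hy s hs)
  set cs := x.map toC with hcs
  set ds := (y.take x.length).map toC with hds
  have hcsl : cs.length = x.length := by simp [hcs]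
  have hdsl : ds.length = x.length := by simp [hds, hlen]
  -- ===== A side =====
  have hA : minusMBIOld x y
      = ((goA (x.reverse.zip ((y.take x.length).reverse)) false).1.reverse,
         (goA (x.reverse.zip ((y.take x.length).reverse)) false).2) := by
    unfold minusMBIOld
    rw [show PySem.List.len x = (x.length : ℤ) from by simp]
    rw [show (PySem.List.pyRange ((x.length : ℤ) - 1) (-1) (-1)).foldl
        (fun (st : List String × Bool) i =>
          let tmp0 := PySem.List.pyGetD x i ""
          let p1 := if st.2 then minus1D tmp0 else (tmp0, st.2)
          let p2 := minusD p1.1 (PySem.List.pyGetD y i "")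
          (st.1 ++ [p2.1], p1.2 || p2.2)) ([], false)
        = (x.reverse.zip ((y.take x.length).reverse)).foldl
          (fun (st : List String × Bool) p =>
            (st.1 ++ [(minusD (if st.2 then minus1D p.1 else (p.1, st.2)).1 p.2).1],
             (if st.2 then minus1D p.1 else (p.1, st.2)).2
               || (minusD (if st.2 then minus1D p.1 else (p.1, st.2)).1 p.2).2)) ([], false)
      from by rw [← pairs_map x y hlen, List.foldl_map]]
    rw [foldA_go]
    simp
  -- turn the zipped string pairs into char pairs
  have hzip : x.reverse.zip ((y.take x.length).reverse)
      = (cs.reverse.zip ds.reverse).map (fun p => (String.ofList [p.1], String.ofList [p.2])) := by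
    conv_lhs => rw [hyeq]
    conv_lhs => rw [hxeq]
    rw [← List.map_reverse (l := cs), ← List.map_reverse (l := ds), List.zip_map]
    rfl
  have hbound : ∀ p ∈ cs.reverse.zip ds.reverse, p.1 ∈ pvDigitChars ∧ p.2 ∈ pvDigitChars := by
    intro p hp
    have h1 := List.of_mem_zip hp
    exact ⟨hxc p.1 (List.mem_reverse.mp h1.1), hyc p.2 (List.mem_reverse.mp h1.2)⟩
  have hvb : ∀ c ∈ pvDigitChars, dval c ≤ 9 := by
    intro c hc
    fin_cases hc <;> decide
  have hnps : ∃ l, l = (cs.reverse.zip ds.reverse).map (fun p => (dval p.1, dval p.2)) := ⟨_, rfl⟩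
  obtain ⟨nps, hnps⟩ := hnps
  have hnpsl : nps.length = x.length := by
    rw [hnps]
    simp [List.length_zip, hcsl, hdsl]
  have hfst : nps.map Prod.fst = cs.reverse.map dval := by
    rw [hnps, List.map_map]
    have := List.map_fst_zip (l₁ := cs.reverse) (l₂ := ds.reverse) (by simp [hcsl, hdsl])
    calc (cs.reverse.zip ds.reverse).map (Prod.fst ∘ fun p => (dval p.1, dval p.2))
        = (cs.reverse.zip ds.reverse).map (dval ∘ Prod.fst) := rfl
      _ = ((cs.reverse.zip ds.reverse).map Prod.fst).map dval := by rw [List.map_map]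
      _ = cs.reverse.map dval := by rw [this]
  have hsnd : nps.map Prod.snd = ds.reverse.map dval := by
    rw [hnps, List.map_map]
    have := List.map_snd_zip (l₁ := cs.reverse) (l₂ := ds.reverse) (by simp [hcsl, hdsl])
    calc (cs.reverse.zip ds.reverse).map (Prod.snd ∘ fun p => (dval p.1, dval p.2))
        = (cs.reverse.zip ds.reverse).map (dval ∘ Prod.snd) := rfl
      _ = ((cs.reverse.zip ds.reverse).map Prod.snd).map dval := by rw [List.map_map]
      _ = ds.reverse.map dval := by rw [this]
  have hnb : ∀ p ∈ nps, p.1 ≤ 9 ∧ p.2 ≤ 9 := by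
    intro p hp
    rw [hnps] at hp
    obtain ⟨q, hq, rfl⟩ := List.mem_map.mp hp
    exact ⟨hvb _ (hbound q hq).1, hvb _ (hbound q hq).2⟩
  set X := valLE (cs.reverse.map dval) with hX
  set Y := valLE (ds.reverse.map dval) with hY
  have hAfinal : minusMBIOld x y
      = (((digLE x.length (((X : ℤ) - (Y : ℤ)) % 10 ^ x.length)).map
            (fun d => String.ofList [Char.ofNat (48 + d)])).reverse,
         decide (X < Y)) := by
    rw [hA, hzip, goA_eq_goN _ _ hbound, ← hnps, goN_eq _ _ hnb, hnpsl, hfst, hsnd, ← hX, ← hY]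
    simp
  -- ===== B side =====
  have hB : minusMBIOld_alt x y
      = (((digLE x.length (((X : ℤ) - (Y : ℤ)) % 10 ^ x.length)).map
            (fun d => String.ofList [Char.ofNat (48 + d)])).reverse,
         decide ((X : ℤ) - (Y : ℤ) < 0)) := by
    simp only [minusMBIOld_alt]
    rw [PySem.List.slice_to y (by positivity : (0:ℤ) ≤ (x.length : ℤ))]
    simp only [Int.toNat_natCast]
    simp only [show x.foldl (fun a s => 10 * a + (pyOrdS s - 48)) (0 : Int) = (X : ℤ) from by
        conv_lhs => rw [hxeq]
        rw [horner_fold cs 0 hxc, hX]; simp,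
      show (y.take x.length).foldl (fun a s => 10 * a + (pyOrdS s - 48)) (0 : Int) = (Y : ℤ) from by
        conv_lhs => rw [hyeq]
        rw [horner_fold ds 0 hyc, hY, hdsl]; simp]
    have hmod : PySem.Int.mod ((X : ℤ) - (Y : ℤ)) (10 ^ x.length)
        = ((X : ℤ) - (Y : ℤ)) % 10 ^ x.length := by
      simp [PySem.Int.mod, Int.fmod_eq_emod]
    rw [hmod, extract_loop x.length _ [], PySem.List.slice?_none_none_neg_one]
    simp only [Option.getD_some, List.nil_append]
    congr 1
  rw [hAfinal, hB]
  congr 1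
  rw [decide_eq_decide]
  omega
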